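-- pv_equiv track=rewrite | github.com/meredithxu/reddit_place_project | Python_code/evaluation.py | create_folds
-- ===== SOURCE A (Python) =====
-- def create_folds(min_x=0, min_y=0, max_x=1002, max_y=1002):
--     # Partition the data into folds
--
--     num_folds = 4
--     num_yincrements = num_folds // 2
--     folds = []
--     for i in range(num_folds):
--         folds.append([])
--
--     halfway_x = int((min_x + max_x) // 2)
--     y_increment = int((max_y - min_y) // num_yincrements)
--
--     for j in range(num_yincrements):
--
--         for x in range(min_x, halfway_x):
--             for y in range((j * y_increment) + min_y, ((j + 1) * y_increment) + min_y):
--                 folds[j].append((x, y))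
--
--         for x in range(halfway_x, max_x):
--             for y in range((j * y_increment) + min_y, ((j + 1) * y_increment) + min_y):
--                 folds[num_yincrements + j].append((x, y))
--
--     return folds
-- ===== SOURCE B (Python) =====
-- def create_folds(min_x=0, min_y=0, max_x=1002, max_y=1002):
--     # Single-pass routing: each grid point is sent to its fold by a computed index.
--     num_folds = 4
--     num_yincrements = num_folds // 2
--     halfway_x = (min_x + max_x) // 2
--     y_increment = (max_y - min_y) // num_yincrements
--     folds = [[], [], [], []]
--     for x in range(min_x, max_x):
--         for y in range(min_y, min_y + num_yincrements * y_increment):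
--             col = 0 if x < halfway_x else 1
--             band = (y - min_y) // y_increment
--             folds[col * num_yincrements + band].append((x, y))
--     return folds
-- ===== Notes on version B (the rewrite author's own statement) =====
-- stated objective: alternative
-- what changed: Replaces A's per-region nested loops (one pair of x/y loops per fold inside a j loop) by a single nested pass over the whole grid that routes each point to its fold via a computed index col*2 + (y-min_y)//y_increment.
import Mathlib
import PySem

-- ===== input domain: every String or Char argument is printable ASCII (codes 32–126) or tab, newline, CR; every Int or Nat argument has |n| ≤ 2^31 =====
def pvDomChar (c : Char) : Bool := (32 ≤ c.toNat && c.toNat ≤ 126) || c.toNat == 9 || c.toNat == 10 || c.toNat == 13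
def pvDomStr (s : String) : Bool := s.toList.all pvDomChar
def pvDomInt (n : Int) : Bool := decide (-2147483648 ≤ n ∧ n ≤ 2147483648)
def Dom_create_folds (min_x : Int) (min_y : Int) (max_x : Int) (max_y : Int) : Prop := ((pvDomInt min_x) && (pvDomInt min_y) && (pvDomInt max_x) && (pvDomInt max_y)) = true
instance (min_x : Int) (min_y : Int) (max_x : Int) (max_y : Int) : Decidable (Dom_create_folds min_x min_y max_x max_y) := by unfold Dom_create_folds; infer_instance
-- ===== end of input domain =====

-- B replaces A's per-region nested loops by one pass over the whole grid that routes each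
-- point to its fold through a computed index (objective: alternative decomposition, same cost).

-- `folds[i].append(v)` on a list of lists (indices used are always in range here)
def pvAppendAt : List (List (Int × Int)) → Nat → (Int × Int) → List (List (Int × Int))
  | [], _, _ => []
  | l :: ls, 0, v => (l ++ [v]) :: ls
  | l :: ls, n + 1, v => l :: pvAppendAt ls n v

-- ===== PORT A =====
def create_folds (min_x : Int) (min_y : Int) (max_x : Int) (max_y : Int) : List (List (Int × Int)) :=
  let num_folds : Int := 4
  let num_yincrements : Int := PySem.Int.floordiv num_folds 2
  let folds : List (List (Int × Int)) :=
    (PySem.List.pyRange 0 num_folds 1).foldl (fun fs _ => fs ++ [[]]) []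
  let halfway_x : Int := PySem.Int.floordiv (min_x + max_x) 2
  let y_increment : Int := PySem.Int.floordiv (max_y - min_y) num_yincrements
  (PySem.List.pyRange 0 num_yincrements 1).foldl (fun fs j =>
    let fs := (PySem.List.pyRange min_x halfway_x 1).foldl (fun fs x =>
      (PySem.List.pyRange (j * y_increment + min_y) ((j + 1) * y_increment + min_y) 1).foldl
        (fun fs y => pvAppendAt fs j.toNat (x, y)) fs) fs
    (PySem.List.pyRange halfway_x max_x 1).foldl (fun fs x =>
      (PySem.List.pyRange (j * y_increment + min_y) ((j + 1) * y_increment + min_y) 1).foldl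
        (fun fs y => pvAppendAt fs (num_yincrements + j).toNat (x, y)) fs) fs) folds

-- ===== PORT B =====
def create_folds_alt (min_x : Int) (min_y : Int) (max_x : Int) (max_y : Int) : List (List (Int × Int)) :=
  let num_folds : Int := 4
  let num_yincrements : Int := PySem.Int.floordiv num_folds 2
  let halfway_x : Int := PySem.Int.floordiv (min_x + max_x) 2
  let y_increment : Int := PySem.Int.floordiv (max_y - min_y) num_yincrements
  (PySem.List.pyRange min_x max_x 1).foldl (fun fs x =>
    (PySem.List.pyRange min_y (min_y + num_yincrements * y_increment) 1).foldl (fun fs y =>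
      let col : Int := if x < halfway_x then 0 else 1
      let band : Int := PySem.Int.floordiv (y - min_y) y_increment
      pvAppendAt fs (col * num_yincrements + band).toNat (x, y)) fs)
    [[], [], [], []]

-- ===== PRECONDITION & SPEC =====
def Spec_create_folds (min_x : Int) (min_y : Int) (max_x : Int) (max_y : Int) (out : List (List (Int × Int))) : Prop := out = create_folds_alt min_x min_y max_x max_y
instance (min_x : Int) (min_y : Int) (max_x : Int) (max_y : Int) (out : List (List (Int × Int))) : Decidable (Spec_create_folds min_x min_y max_x max_y out) := by unfold Spec_create_folds; infer_instance

-- ===== CLAIM (what is proved, stated in full; the proofs are below) =====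
def Claim_equal_create_folds : Prop := ∀ (min_x : Int) (min_y : Int) (max_x : Int) (max_y : Int), Dom_create_folds min_x min_y max_x max_y → Spec_create_folds min_x min_y max_x max_y (create_folds min_x min_y max_x max_y)

-- ===== LEMMAS AND PROOFS =====

-- one row of a fold's rectangle, and a whole rectangle
def pvRow (x c d : Int) : List (Int × Int) := (PySem.List.pyRange c d 1).map (fun y => (x, y))
def pvRect (a b c d : Int) : List (Int × Int) :=
  (PySem.List.pyRange a b 1).flatMap (fun x => pvRow x c d)

-- the common value of both programs
def pvCanon (min_x min_y max_x max_y : Int) : List (List (Int × Int)) :=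
  let hw := PySem.Int.floordiv (min_x + max_x) 2
  let w := PySem.Int.floordiv (max_y - min_y) 2
  [pvRect min_x hw min_y (min_y + w), pvRect min_x hw (min_y + w) (min_y + 2 * w),
   pvRect hw max_x min_y (min_y + w), pvRect hw max_x (min_y + w) (min_y + 2 * w)]

-- appending every (x, y), y ∈ ys, at a fixed fold index
lemma foldl_app0 (ys : List Int) (x : Int) :
    ∀ a b c d : List (Int × Int),
      ys.foldl (fun fs y => pvAppendAt fs 0 (x, y)) [a, b, c, d]
        = [a ++ ys.map (fun y => (x, y)), b, c, d] := by
  induction ys with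
  | nil => intro a b c d; simp
  | cons y t ih => intro a b c d; simpa [pvAppendAt] using ih (a ++ [(x, y)]) b c d

lemma foldl_app1 (ys : List Int) (x : Int) :
    ∀ a b c d : List (Int × Int),
      ys.foldl (fun fs y => pvAppendAt fs 1 (x, y)) [a, b, c, d]
        = [a, b ++ ys.map (fun y => (x, y)), c, d] := by
  induction ys with
  | nil => intro a b c d; simp
  | cons y t ih => intro a b c d; simpa [pvAppendAt] using ih a (b ++ [(x, y)]) c d

lemma foldl_app2 (ys : List Int) (x : Int) :
    ∀ a b c d : List (Int × Int),
      ys.foldl (fun fs y => pvAppendAt fs 2 (x, y)) [a, b, c, d]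
        = [a, b, c ++ ys.map (fun y => (x, y)), d] := by
  induction ys with
  | nil => intro a b c d; simp
  | cons y t ih => intro a b c d; simpa [pvAppendAt] using ih a b (c ++ [(x, y)]) d

lemma foldl_app3 (ys : List Int) (x : Int) :
    ∀ a b c d : List (Int × Int),
      ys.foldl (fun fs y => pvAppendAt fs 3 (x, y)) [a, b, c, d]
        = [a, b, c, d ++ ys.map (fun y => (x, y))] := by
  induction ys with
  | nil => intro a b c d; simp
  | cons y t ih => intro a b c d; simpa [pvAppendAt] using ih a b c (d ++ [(x, y)])

-- A's double loop at a fixed fold index k ∈ {0,1,2,3}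
lemma loopA0 (xs : List Int) (c d : Int) :
    ∀ a b c2 d2 : List (Int × Int),
      xs.foldl (fun fs x => (PySem.List.pyRange c d 1).foldl
          (fun fs y => pvAppendAt fs 0 (x, y)) fs) [a, b, c2, d2]
        = [a ++ xs.flatMap (fun x => pvRow x c d), b, c2, d2] := by
  induction xs with
  | nil => intro a b c2 d2; simp
  | cons x t ih =>
      intro a b c2 d2
      simp only [List.foldl_cons, foldl_app0]
      simpa [pvRow] using ih (a ++ pvRow x c d) b c2 d2

lemma loopA1 (xs : List Int) (c d : Int) :
    ∀ a b c2 d2 : List (Int × Int),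
      xs.foldl (fun fs x => (PySem.List.pyRange c d 1).foldl
          (fun fs y => pvAppendAt fs 1 (x, y)) fs) [a, b, c2, d2]
        = [a, b ++ xs.flatMap (fun x => pvRow x c d), c2, d2] := by
  induction xs with
  | nil => intro a b c2 d2; simp
  | cons x t ih =>
      intro a b c2 d2
      simp only [List.foldl_cons, foldl_app1]
      simpa [pvRow] using ih a (b ++ pvRow x c d) c2 d2

lemma loopA2 (xs : List Int) (c d : Int) :
    ∀ a b c2 d2 : List (Int × Int),
      xs.foldl (fun fs x => (PySem.List.pyRange c d 1).foldl
          (fun fs y => pvAppendAt fs 2 (x, y)) fs) [a, b, c2, d2]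
        = [a, b, c2 ++ xs.flatMap (fun x => pvRow x c d), d2] := by
  induction xs with
  | nil => intro a b c2 d2; simp
  | cons x t ih =>
      intro a b c2 d2
      simp only [List.foldl_cons, foldl_app2]
      simpa [pvRow] using ih a b (c2 ++ pvRow x c d) d2

lemma loopA3 (xs : List Int) (c d : Int) :
    ∀ a b c2 d2 : List (Int × Int),
      xs.foldl (fun fs x => (PySem.List.pyRange c d 1).foldl
          (fun fs y => pvAppendAt fs 3 (x, y)) fs) [a, b, c2, d2]
        = [a, b, c2, d2 ++ xs.flatMap (fun x => pvRow x c d)] := by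
  induction xs with
  | nil => intro a b c2 d2; simp
  | cons x t ih =>
      intro a b c2 d2
      simp only [List.foldl_cons, foldl_app3]
      simpa [pvRow] using ih a b c2 (d2 ++ pvRow x c d)

lemma create_folds_eq_canon (min_x min_y max_x max_y : Int) :
    create_folds min_x min_y max_x max_y = pvCanon min_x min_y max_x max_y := by
  have hnum : PySem.Int.floordiv 4 2 = (2 : Int) := by decide
  have hinit : List.foldl (fun (fs : List (List (Int × Int))) (_ : Int) => fs ++ [[]]) []
      (PySem.List.pyRange 0 4) = [[], [], [], []] := by decide
  have hj : PySem.List.pyRange 0 2 = [0, 1] := by decide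
  unfold create_folds pvCanon
  simp only [hnum, hinit, hj, List.foldl_cons, List.foldl_nil]
  norm_num [show Int.toNat 2 = 2 from rfl, show Int.toNat 3 = 3 from rfl]
  rw [loopA0, loopA2, loopA1, loopA3]
  simp [pvRect, pvRow, add_comm]

-- B's inner y-loop for a point in the left column (index = band)
lemma innerB0 (my w x : Int) (a b c d : List (Int × Int)) :
    (PySem.List.pyRange my (my + 2 * w) 1).foldl
        (fun fs y => pvAppendAt fs (PySem.Int.floordiv (y - my) w).toNat (x, y)) [a, b, c, d]
      = [a ++ pvRow x my (my + w), b ++ pvRow x (my + w) (my + 2 * w), c, d] := by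
  by_cases hw : w ≤ 0
  · rw [PySem.List.pyRange_one_eq_nil (show my + 2 * w ≤ my by omega)]
    simp [pvRow, PySem.List.pyRange_one_eq_nil (show my + w ≤ my by omega),
      PySem.List.pyRange_one_eq_nil (show my + 2 * w ≤ my + w by omega)]
  · rw [not_le] at hw
    rw [PySem.List.pyRange_one_append my (my + w) (my + 2 * w) (by omega) (by omega),
      List.foldl_append]
    rw [PySem.List.foldl_congr_mem (PySem.List.pyRange my (my + w)) _
      (fun fs y => pvAppendAt fs 0 (x, y)) _
      (by
        intro fs y hy
        rcases PySem.List.mem_pyRange_one.mp hy with ⟨h1, h2⟩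
        have hb : PySem.Int.floordiv (y - my) w = 0 :=
          (PySem.Int.floordiv_eq_iff_of_pos hw).mpr (by constructor <;> nlinarith)
        rw [hb]; rfl)]
    rw [foldl_app0]
    rw [PySem.List.foldl_congr_mem (PySem.List.pyRange (my + w) (my + 2 * w)) _
      (fun fs y => pvAppendAt fs 1 (x, y)) _
      (by
        intro fs y hy
        rcases PySem.List.mem_pyRange_one.mp hy with ⟨h1, h2⟩
        have hb : PySem.Int.floordiv (y - my) w = 1 :=
          (PySem.Int.floordiv_eq_iff_of_pos hw).mpr (by constructor <;> nlinarith)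
        rw [hb]; rfl)]
    rw [foldl_app1]
    simp [pvRow]

lemma innerB1 (my w x : Int) (a b c d : List (Int × Int)) :
    (PySem.List.pyRange my (my + 2 * w) 1).foldl
        (fun fs y => pvAppendAt fs (2 + PySem.Int.floordiv (y - my) w).toNat (x, y)) [a, b, c, d]
      = [a, b, c ++ pvRow x my (my + w), d ++ pvRow x (my + w) (my + 2 * w)] := by
  by_cases hw : w ≤ 0
  · rw [PySem.List.pyRange_one_eq_nil (show my + 2 * w ≤ my by omega)]
    simp [pvRow, PySem.List.pyRange_one_eq_nil (show my + w ≤ my by omega),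
      PySem.List.pyRange_one_eq_nil (show my + 2 * w ≤ my + w by omega)]
  · rw [not_le] at hw
    rw [PySem.List.pyRange_one_append my (my + w) (my + 2 * w) (by omega) (by omega),
      List.foldl_append]
    rw [PySem.List.foldl_congr_mem (PySem.List.pyRange my (my + w)) _
      (fun fs y => pvAppendAt fs 2 (x, y)) _
      (by
        intro fs y hy
        rcases PySem.List.mem_pyRange_one.mp hy with ⟨h1, h2⟩
        have hb : PySem.Int.floordiv (y - my) w = 0 :=
          (PySem.Int.floordiv_eq_iff_of_pos hw).mpr (by constructor <;> nlinarith)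
        rw [hb]; rfl)]
    rw [foldl_app2]
    rw [PySem.List.foldl_congr_mem (PySem.List.pyRange (my + w) (my + 2 * w)) _
      (fun fs y => pvAppendAt fs 3 (x, y)) _
      (by
        intro fs y hy
        rcases PySem.List.mem_pyRange_one.mp hy with ⟨h1, h2⟩
        have hb : PySem.Int.floordiv (y - my) w = 1 :=
          (PySem.Int.floordiv_eq_iff_of_pos hw).mpr (by constructor <;> nlinarith)
        rw [hb]; rfl)]
    rw [foldl_app3]
    simp [pvRow]

lemma loopBL (my w : Int) (xs : List Int) :
    ∀ a b c d : List (Int × Int),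
      xs.foldl (fun fs x => (PySem.List.pyRange my (my + 2 * w)).foldl
          (fun fs y => pvAppendAt fs (PySem.Int.floordiv (y - my) w).toNat (x, y)) fs)
        [a, b, c, d]
      = [a ++ xs.flatMap (fun x => pvRow x my (my + w)),
         b ++ xs.flatMap (fun x => pvRow x (my + w) (my + 2 * w)), c, d] := by
  induction xs with
  | nil => intro a b c d; simp
  | cons x t ih =>
      intro a b c d
      simp only [List.foldl_cons, innerB0]
      simpa using ih (a ++ pvRow x my (my + w)) (b ++ pvRow x (my + w) (my + 2 * w)) c d

lemma loopBR (my w : Int) (xs : List Int) :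
    ∀ a b c d : List (Int × Int),
      xs.foldl (fun fs x => (PySem.List.pyRange my (my + 2 * w)).foldl
          (fun fs y => pvAppendAt fs (2 + PySem.Int.floordiv (y - my) w).toNat (x, y)) fs)
        [a, b, c, d]
      = [a, b, c ++ xs.flatMap (fun x => pvRow x my (my + w)),
         d ++ xs.flatMap (fun x => pvRow x (my + w) (my + 2 * w))] := by
  induction xs with
  | nil => intro a b c d; simp
  | cons x t ih =>
      intro a b c d
      simp only [List.foldl_cons, innerB1]
      simpa using ih a b (c ++ pvRow x my (my + w)) (d ++ pvRow x (my + w) (my + 2 * w))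

lemma create_folds_alt_eq_canon (min_x min_y max_x max_y : Int) :
    create_folds_alt min_x min_y max_x max_y = pvCanon min_x min_y max_x max_y := by
  have hnum : PySem.Int.floordiv 4 2 = (2 : Int) := by decide
  unfold create_folds_alt pvCanon
  simp only [hnum]
  by_cases hle : min_x ≤ max_x
  · obtain ⟨h1, h2⟩ := PySem.Int.floordiv_two_mid_bounds hle
    rw [PySem.List.pyRange_one_append min_x (PySem.Int.floordiv (min_x + max_x) 2) max_x h1 h2,
      List.foldl_append]
    rw [PySem.List.foldl_congr_mem
        (PySem.List.pyRange min_x (PySem.Int.floordiv (min_x + max_x) 2)) _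
        (fun fs x => (PySem.List.pyRange min_y (min_y + 2 * PySem.Int.floordiv (max_y - min_y) 2)).foldl
          (fun fs y => pvAppendAt fs (PySem.Int.floordiv (y - min_y) (PySem.Int.floordiv (max_y - min_y) 2)).toNat (x, y)) fs) _
        (by
          intro fs x hx
          obtain ⟨_, hxlt⟩ := PySem.List.mem_pyRange_one.mp hx
          simp only [if_pos hxlt, zero_mul, zero_add])]
    rw [loopBL]
    rw [PySem.List.foldl_congr_mem
        (PySem.List.pyRange (PySem.Int.floordiv (min_x + max_x) 2) max_x) _
        (fun fs x => (PySem.List.pyRange min_y (min_y + 2 * PySem.Int.floordiv (max_y - min_y) 2)).foldl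
          (fun fs y => pvAppendAt fs (2 + PySem.Int.floordiv (y - min_y) (PySem.Int.floordiv (max_y - min_y) 2)).toNat (x, y)) fs) _
        (by
          intro fs x hx
          obtain ⟨hxge, _⟩ := PySem.List.mem_pyRange_one.mp hx
          simp only [if_neg (not_lt.mpr hxge), one_mul])]
    rw [loopBR]
    simp [pvRect]
  · have hxlt : max_x < min_x := lt_of_not_ge hle
    have hd : PySem.Int.floordiv (min_x + max_x) 2 = (min_x + max_x) / 2 :=
      PySem.Int.floordiv_eq_ediv_of_pos (by norm_num)
    rw [PySem.List.pyRange_one_eq_nil (le_of_lt hxlt)]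
    simp [pvRect, PySem.List.pyRange_one_eq_nil (show (min_x + max_x) / 2 ≤ min_x by omega),
      PySem.List.pyRange_one_eq_nil (show max_x ≤ (min_x + max_x) / 2 by omega)]

-- ===== VERDICT (by name: the statement is the Claim_ definition above) =====
theorem create_folds_spec : Claim_equal_create_folds := by
  intro mx my Mx My _
  unfold Spec_create_folds
  rw [create_folds_eq_canon, create_folds_alt_eq_canon]
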